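-- pv_equiv track=rewrite | github.com/whisoo98/ProblemSolving | 프로그래머스/lv2/87390. n＾2 배열 자르기/n＾2 배열 자르기.py | solution
-- ===== SOURCE A (Python) =====
-- def solution(n, left, right):
--     mok_left, rest_left = divmod(left,n)
--     mok_right, rest_right = divmod(right,n)
--     # if(rest_left ==0):
--     #     mok_left-=1
--     # if rest_right == 0:
--     #     mok_right -=1
--     answer =[]
--     left_l=[]
--     right_l = []
--     if(mok_left == mok_right):
--         for i in range(rest_left,rest_right+1):
--             if i<= mok_left:
--                 left_l.append(mok_left+1)
--             else:
--                 left_l.append(i+1)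
--         return left_l
--
--
--     for i in range(rest_left,n):
--         if i<= mok_left:
--             left_l.append(mok_left+1)
--         else:
--             left_l.append(i+1)
--
--
--     middle_l = []
--     for i in range(mok_left+1,mok_right):
--         for j in range(n):
--             if j<=i:
--                 middle_l.append(i+1)
--             else:
--                 middle_l.append(j+1)
--
--
--     for i in range(rest_right+1):
--         if i<= mok_right:
--             right_l.append(mok_right+1)
--         else:
--             right_l.append(i+1)
--
--     answer  =[]
--     answer = left_l + middle_l + right_l
--
--     return answer
-- ===== SOURCE B (Python) =====
-- def solution(n, left, right):
--     answer = []
--     for k in range(left, right + 1):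
--         answer.append(max(k // n, k % n) + 1)
--     return answer
-- ===== Notes on version B (the rewrite author's own statement) =====
-- stated objective: simpler
-- what changed: Replaced the three-part row construction (left partial row, nested middle-rows loop, right partial row, plus a same-row special case) with a single flat loop over range(left, right+1) appending max(k//n, k%n)+1, keeping no row/block bookkeeping.
-- outside the precondition, e.g. on solution(1, 0, -1): A returns [1, 1], B returns []; on solution(-5, -12, -5): A returns [2], B returns [3, 3, 3, 2, 2, 2, 2, 2]; on solution(6, 6711, -32): A returns [1119, 1119, 1119, 1, 2, 3, 4, 5], B returns []
import Mathlib
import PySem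

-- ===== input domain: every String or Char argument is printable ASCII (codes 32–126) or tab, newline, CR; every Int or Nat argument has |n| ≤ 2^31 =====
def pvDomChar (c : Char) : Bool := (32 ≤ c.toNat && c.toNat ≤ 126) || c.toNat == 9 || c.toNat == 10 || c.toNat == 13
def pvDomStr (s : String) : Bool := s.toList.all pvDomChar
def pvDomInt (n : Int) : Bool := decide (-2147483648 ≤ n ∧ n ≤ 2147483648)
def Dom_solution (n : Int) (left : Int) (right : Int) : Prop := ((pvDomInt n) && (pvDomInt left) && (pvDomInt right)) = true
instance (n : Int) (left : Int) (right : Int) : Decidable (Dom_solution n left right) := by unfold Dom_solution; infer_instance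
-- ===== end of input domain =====

-- B replaces A's three-part row construction with one flat loop appending max(k//n, k%n)+1; simpler, same values on the natural domain.


-- ===== PORT A =====
def solution (n : Int) (left : Int) (right : Int) : List Int :=
  match PySem.Int.divmod? left n, PySem.Int.divmod? right n with
  | some (mok_left, rest_left), some (mok_right, rest_right) =>
    if mok_left = mok_right then
      (PySem.List.pyRange rest_left (rest_right + 1) 1).foldl
        (fun acc i => acc ++ [if i ≤ mok_left then mok_left + 1 else i + 1]) []
    else
      let left_l := (PySem.List.pyRange rest_left n 1).foldl
        (fun acc i => acc ++ [if i ≤ mok_left then mok_left + 1 else i + 1]) []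
      let middle_l := (PySem.List.pyRange (mok_left + 1) mok_right 1).foldl
        (fun acc i => (PySem.List.pyRange 0 n 1).foldl
          (fun acc2 j => acc2 ++ [if j ≤ i then i + 1 else j + 1]) acc) []
      let right_l := (PySem.List.pyRange 0 (rest_right + 1) 1).foldl
        (fun acc i => acc ++ [if i ≤ mok_right then mok_right + 1 else i + 1]) []
      left_l ++ middle_l ++ right_l
  | _, _ => []   -- unreachable: divmod? is none only for n = 0, excluded by Pre_ (Python raises ZeroDivisionError)

-- ===== PORT B =====
def solution_alt (n : Int) (left : Int) (right : Int) : List Int :=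
  (PySem.List.pyRange left (right + 1) 1).foldl
    (fun acc k => acc ++ [max (PySem.Int.floordiv k n) (PySem.Int.mod k n) + 1]) []

-- ===== PRECONDITION & SPEC =====
-- Pre_ excludes n = 0 (A raises ZeroDivisionError) and, except when both ends fall in the
-- same division block, restricts to the problem's natural domain 1 ≤ n with left ≤ right:
-- on a reversed or negative-n multi-block range the slice [left..right] is unspecified and
-- each program's value just reflects its own loop structure (B yields the empty slice,
-- A a mixture of its three row pieces), so neither value is the one to match.
def Pre_solution (n : Int) (left : Int) (right : Int) : Prop :=
  (1 ≤ n ∧ left ≤ right) ∨ (n ≠ 0 ∧ PySem.Int.floordiv left n = PySem.Int.floordiv right n)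
instance (n : Int) (left : Int) (right : Int) : Decidable (Pre_solution n left right) := by
  unfold Pre_solution; infer_instance

def pvWitness_solution : Int × Int × Int := (3, 2, 5)

def Spec_solution (n : Int) (left : Int) (right : Int) (out : List Int) : Prop := out = solution_alt n left right
instance (n : Int) (left : Int) (right : Int) (out : List Int) : Decidable (Spec_solution n left right out) := by unfold Spec_solution; infer_instance

-- ===== CLAIM (what is proved, stated in full; the proofs are below) =====
def Claim_equal_solution : Prop := ∀ (n : Int) (left : Int) (right : Int), Dom_solution n left right → Pre_solution n left right → Spec_solution n left right (solution n left right)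

-- ===== LEMMAS AND PROOFS =====

-- the per-cell value B computes
def pvF (n k : Int) : Int := max (PySem.Int.floordiv k n) (PySem.Int.mod k n) + 1

theorem pvB_eq_map (n left right : Int) :
    solution_alt n left right = (PySem.List.pyRange left (right + 1) 1).map (pvF n) := by
  unfold solution_alt pvF
  rw [PySem.List.foldl_append_singleton_eq_map]
  simp

theorem pv_ite_max (q i : Int) : (if i ≤ q then q + 1 else i + 1) = max q i + 1 := by
  omega

theorem pv_floordiv_shift {n : Int} (hn : 0 < n) (q i : Int) (h0 : 0 ≤ i) (h1 : i < n) :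
    PySem.Int.floordiv (q * n + i) n = q := by
  rw [PySem.Int.floordiv_eq_iff_of_pos hn]
  constructor <;> nlinarith

theorem pv_mod_shift {n : Int} (hn : 0 < n) (q i : Int) (h0 : 0 ≤ i) (h1 : i < n) :
    PySem.Int.mod (q * n + i) n = i := by
  have hd := PySem.Int.floordiv_mul_add_mod (q * n + i) n
  rw [pv_floordiv_shift hn q i h0 h1] at hd
  omega

-- a whole segment inside one division row, given the shift facts for its cells
theorem pv_segment_h {n : Int} (q a b : Int)
    (hs : ∀ i : Int, a ≤ i → i < b →
      PySem.Int.floordiv (q * n + i) n = q ∧ PySem.Int.mod (q * n + i) n = i) :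
    (PySem.List.pyRange (q * n + a) (q * n + b) 1).map (pvF n)
      = (PySem.List.pyRange a b 1).map (fun i => max q i + 1) := by
  rw [PySem.List.pyRange_one (q * n + a), PySem.List.pyRange_one a]
  have hlen : (q * n + b - (q * n + a)) = b - a := by ring
  rw [hlen]
  simp only [List.map_map]
  apply List.map_congr_left
  intro k hk
  have hk' : (k : Int) < b - a := by
    have := List.mem_range.mp hk
    omega
  simp only [Function.comp]
  unfold pvF
  have h1 : a ≤ a + (k : Int) := by omega
  have h2 : a + (k : Int) < b := by omega
  obtain ⟨hd, hm⟩ := hs (a + k) h1 h2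
  rw [show q * n + a + (k : Int) = q * n + (a + k) by ring, hd, hm]

theorem pv_segment {n : Int} (hn : 0 < n) (q a b : Int) (ha : 0 ≤ a) (hb : b ≤ n) :
    (PySem.List.pyRange (q * n + a) (q * n + b) 1).map (pvF n)
      = (PySem.List.pyRange a b 1).map (fun i => max q i + 1) := by
  apply pv_segment_h
  intro i h1 h2
  exact ⟨pv_floordiv_shift hn q i (by omega) (by omega),
         pv_mod_shift hn q i (by omega) (by omega)⟩

theorem pv_shift_neg {n : Int} (hn : n < 0) (q i : Int) (h0 : n < i) (h1 : i ≤ 0) :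
    PySem.Int.floordiv (q * n + i) n = q ∧ PySem.Int.mod (q * n + i) n = i := by
  have hd : PySem.Int.floordiv (q * n + i) n = q := by
    have h := pv_floordiv_shift (show (0:Int) < -n by omega) q (-i) (by omega) (by omega)
    rw [show q * -n + -i = -(q * n + i) by ring] at h
    rw [← PySem.Int.floordiv_neg_neg (q * n + i) n]
    exact h
  refine ⟨hd, ?_⟩
  have hmm := PySem.Int.floordiv_mul_add_mod (q * n + i) n
  rw [hd] at hmm
  omega

theorem pv_mod_bounds {n : Int} (hn : 0 < n) (a : Int) :
    0 ≤ PySem.Int.mod a n ∧ PySem.Int.mod a n < n := by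
  rw [PySem.Int.mod_eq_emod_of_pos hn]
  exact ⟨Int.emod_nonneg a (by omega), Int.emod_lt_of_pos a hn⟩

theorem pv_mod_bounds_neg {n : Int} (hn : n < 0) (a : Int) :
    n < PySem.Int.mod a n ∧ PySem.Int.mod a n ≤ 0 := by
  have h := pv_mod_bounds (show (0:Int) < -n by omega) (-a)
  rw [PySem.Int.mod_neg_neg a n] at h
  omega

-- rows p..q-1 in one flat range
theorem pv_rows {n : Int} (hn : 0 < n) (p q : Int) (hpq : p ≤ q) :
    (PySem.List.pyRange (p * n) (q * n) 1).map (pvF n)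
      = (PySem.List.pyRange p q 1).flatMap
          (fun i => (PySem.List.pyRange 0 n 1).map (fun j => max i j + 1)) := by
  have key : ∀ (m : Nat) (p : Int), p + m = q →
      (PySem.List.pyRange (p * n) (q * n) 1).map (pvF n)
        = (PySem.List.pyRange p q 1).flatMap
            (fun i => (PySem.List.pyRange 0 n 1).map (fun j => max i j + 1)) := by
    intro m
    induction m with
    | zero =>
      intro p hp
      have hpq : p = q := by omega
      subst hpq
      rw [PySem.List.pyRange_one_eq_nil (le_refl (p * n)),
          PySem.List.pyRange_one_eq_nil (le_refl p)]
      simp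
    | succ m ih =>
      intro p hp
      have hlt : p < q := by omega
      have h1 : p * n ≤ (p + 1) * n := by nlinarith
      have h2 : (p + 1) * n ≤ q * n := by nlinarith
      rw [PySem.List.pyRange_one_append (p * n) ((p + 1) * n) (q * n) h1 h2,
          List.map_append,
          PySem.List.pyRange_one_cons hlt, List.flatMap_cons]
      congr 1
      · have := pv_segment hn p 0 n (le_refl 0) (le_refl n)
        rw [show p * n + 0 = p * n by ring, show p * n + n = (p + 1) * n by ring] at this
        exact this
      · exact ih (p + 1) (by omega)
  exact key (q - p).toNat p (by omega)

theorem solution_spec' (n left right : Int) (h : Pre_solution n left right) :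
    solution n left right = solution_alt n left right := by
  have hn0 : n ≠ 0 := by
    rcases h with ⟨hn, _⟩ | ⟨hn, _⟩ <;> omega
  rw [pvB_eq_map]
  unfold solution
  have hdl : PySem.Int.divmod? left n
      = some (PySem.Int.floordiv left n, PySem.Int.mod left n) := by
    simp [PySem.Int.divmod?, PySem.Int.floordiv, PySem.Int.mod, hn0]
  have hdr : PySem.Int.divmod? right n
      = some (PySem.Int.floordiv right n, PySem.Int.mod right n) := by
    simp [PySem.Int.divmod?, PySem.Int.floordiv, PySem.Int.mod, hn0]
  rw [hdl, hdr]
  set qL := PySem.Int.floordiv left n with hqL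
  set rL := PySem.Int.mod left n with hrL
  set qR := PySem.Int.floordiv right n with hqR
  set rR := PySem.Int.mod right n with hrR
  have hL : qL * n + rL = left := PySem.Int.floordiv_mul_add_mod left n
  have hR : qR * n + rR = right := PySem.Int.floordiv_mul_add_mod right n
  simp only []
  split_ifs with heq
  · -- same division row: just the first loop
    rw [PySem.List.foldl_append_singleton_eq_map, List.nil_append]
    have hsh : ∀ i : Int, rL ≤ i → i < rR + 1 →
        PySem.Int.floordiv (qL * n + i) n = qL ∧ PySem.Int.mod (qL * n + i) n = i := by
      intro i h1 h2
      rcases lt_or_gt_of_ne hn0 with hneg | hpos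
      · have hbL := pv_mod_bounds_neg hneg left
        have hbR := pv_mod_bounds_neg hneg right
        rw [← hrL] at hbL; rw [← hrR] at hbR
        exact pv_shift_neg hneg qL i (by omega) (by omega)
      · have hbL := pv_mod_bounds hpos left
        have hbR := pv_mod_bounds hpos right
        rw [← hrL] at hbL; rw [← hrR] at hbR
        exact ⟨pv_floordiv_shift hpos qL i (by omega) (by omega),
               pv_mod_shift hpos qL i (by omega) (by omega)⟩
    have hseg := pv_segment_h qL rL (rR + 1) hsh
    rw [show qL * n + rL = left from hL,
        show qL * n + (rR + 1) = right + 1 by (rw [heq]; omega)] at hseg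
    rw [hseg]
    apply List.map_congr_left
    intro i _
    exact pv_ite_max qL i
  · -- different rows: the same-block disjunct of Pre_ is ruled out by heq
    have hp : 1 ≤ n ∧ left ≤ right := by
      rcases h with hp | ⟨_, he⟩
      · exact hp
      · rw [← hqL, ← hqR] at he
        exact absurd he heq
    obtain ⟨hn, hlr⟩ := hp
    have hnpos : (0 : Int) < n := by omega
    have hrLb := pv_mod_bounds hnpos left
    have hrRb := pv_mod_bounds hnpos right
    rw [← hrL] at hrLb; rw [← hrR] at hrRb
    have hqle : qL ≤ qR := by
      by_contra hc
      push Not at hc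
      nlinarith
    have hqlt : qL < qR := lt_of_le_of_ne hqle heq
    rw [PySem.List.foldl_append_singleton_eq_map, List.nil_append]
    have hmid : ∀ (init : List Int),
        (PySem.List.pyRange (qL + 1) qR 1).foldl
          (fun acc i => (PySem.List.pyRange 0 n 1).foldl
            (fun acc2 j => acc2 ++ [if j ≤ i then i + 1 else j + 1]) acc) init
        = init ++ (PySem.List.pyRange (qL + 1) qR 1).flatMap
            (fun i => (PySem.List.pyRange 0 n 1).map
              (fun j => if j ≤ i then i + 1 else j + 1)) := by
      intro init
      have : (fun (acc : List Int) (i : Int) => (PySem.List.pyRange 0 n 1).foldl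
            (fun acc2 j => acc2 ++ [if j ≤ i then i + 1 else j + 1]) acc)
          = fun acc i => acc ++ (PySem.List.pyRange 0 n 1).map
            (fun j => if j ≤ i then i + 1 else j + 1) := by
        funext acc i
        rw [PySem.List.foldl_append_singleton_eq_map]
      rw [this, PySem.List.foldl_append_eq_flatMap]
    rw [hmid, List.nil_append, PySem.List.foldl_append_singleton_eq_map, List.nil_append]
    -- split B's flat range at the row boundaries
    have hb1 : left ≤ (qL + 1) * n := by nlinarith
    have hb2 : (qL + 1) * n ≤ qR * n := by nlinarith
    have hb3 : qR * n ≤ right + 1 := by nlinarith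
    rw [PySem.List.pyRange_one_append left (qR * n) (right + 1) (by omega) hb3,
        PySem.List.pyRange_one_append left ((qL + 1) * n) (qR * n) (by omega) hb2,
        List.map_append, List.map_append]
    congr 1
    · congr 1
      · -- left partial row
        have hseg := pv_segment hnpos qL rL n hrLb.1 (le_refl n)
        rw [show qL * n + rL = left from hL,
            show qL * n + n = (qL + 1) * n by ring] at hseg
        rw [hseg]
        apply List.map_congr_left
        intro i _
        exact pv_ite_max qL i
      · -- middle rows
        rw [pv_rows hnpos (qL + 1) qR (by omega)]
        apply List.flatMap_congr
        intro i _
        apply List.map_congr_left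
        intro j _
        exact pv_ite_max i j
    · -- right partial row
      have hseg := pv_segment hnpos qR 0 (rR + 1) (le_refl 0) (by omega)
      rw [show qR * n + 0 = qR * n by ring,
          show qR * n + (rR + 1) = right + 1 by omega] at hseg
      rw [hseg]
      apply List.map_congr_left
      intro i _
      exact pv_ite_max qR i

-- ===== VERDICT (by name: the statement is the Claim_ definition above) =====
theorem solution_spec : Claim_equal_solution := by
  intro n left right _ hpre
  unfold Spec_solution
  exact solution_spec' n left right hpre
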